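-- pv_equiv track=rewrite | github.com/harelm4/Embible-Backend | src/utils/strings.py | find_question_word_index
-- ===== SOURCE A (Python) =====
-- def find_question_word_index(s):
--     words = s['text'].split()
--     indeces=[]
--     char_inex=0
--     for i, word in enumerate(words):
--         if all(c == '?' for c in word):
--             indeces.append((char_inex,len(word)))
--         char_inex+=len(word)+1
--     return indeces
-- ===== SOURCE B (Python) =====
-- def find_question_word_index(s):
--     # Recursion on the word list: offsets of the tail's matches are computed
--     # relative to the tail and then shifted by len(head)+1 -- no running index.
--     def go(words):
--         if not words:
--             return []
--         w = words[0]
--         tail = [(off + len(w) + 1, n) for off, n in go(words[1:])]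
--         if all(c == '?' for c in w):
--             return [(0, len(w))] + tail
--         return tail
--     return go(s['text'].split())
-- ===== Notes on version B (the rewrite author's own statement) =====
-- stated objective: alternative
-- what changed: B replaces A's iterative loop with a running character index by structural recursion on the word list: each call solves the tail with offsets relative to the tail's start and shifts them by len(head)+1, prepending (0, len(head)) for an all-'?' head.
import Mathlib
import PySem

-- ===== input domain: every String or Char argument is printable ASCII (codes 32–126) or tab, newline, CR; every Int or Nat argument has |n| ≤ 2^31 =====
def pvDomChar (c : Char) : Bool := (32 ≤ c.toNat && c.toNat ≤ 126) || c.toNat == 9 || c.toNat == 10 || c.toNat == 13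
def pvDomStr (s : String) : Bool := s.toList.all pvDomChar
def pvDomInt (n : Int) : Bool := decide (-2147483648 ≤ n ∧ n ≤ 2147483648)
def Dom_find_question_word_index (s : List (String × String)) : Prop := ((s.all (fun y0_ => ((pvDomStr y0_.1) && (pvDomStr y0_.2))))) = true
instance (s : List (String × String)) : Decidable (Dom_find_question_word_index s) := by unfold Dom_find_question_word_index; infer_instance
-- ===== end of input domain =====

-- B replaces A's running-index loop by structural recursion that shifts the tail's
-- relative offsets by len(head)+1; equivalent alternative decomposition (no speed claim).

-- ===== PORT A =====
-- A: one loop over enumerate(words) carrying (indeces, char_inex); append on the all-'?' test.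
def find_question_word_index (s : List (String × String)) : List (Int × Int) :=
  match (PySem.Dict.mk s).get? "text" with
  | none => []   -- KeyError in Python; excluded by Pre_
  | some t =>
    let words := PySem.Str.split₀ t
    ((PySem.List.enumerate words).foldl
      (fun (st : List (Int × Int) × Int) iw =>
        ((if iw.2.toList.all (fun c => c == '?')
          then st.1 ++ [(st.2, PySem.Str.len iw.2)]
          else st.1),
         st.2 + PySem.Str.len iw.2 + 1))
      ([], 0)).1

-- ===== PORT B =====
-- B helper: recursion on the word list; tail's offsets are shifted by len(head)+1.
def fqwiGo : List String → List (Int × Int)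
  | [] => []
  | w :: ws =>
    let tail := (fqwiGo ws).map (fun p => (p.1 + PySem.Str.len w + 1, p.2))
    if w.toList.all (fun c => c == '?')
    then (0, PySem.Str.len w) :: tail
    else tail

def find_question_word_index_alt (s : List (String × String)) : List (Int × Int) :=
  match (PySem.Dict.mk s).get? "text" with
  | none => []   -- KeyError in Python; excluded by Pre_
  | some t => fqwiGo (PySem.Str.split₀ t)

-- ===== PRECONDITION & SPEC =====
-- A raises KeyError when the dict has no 'text' key; Pre_ requires the key to be present.
def Pre_find_question_word_index (s : List (String × String)) : Prop :=
  "text" ∈ s.map Prod.fst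
instance (s : List (String × String)) : Decidable (Pre_find_question_word_index s) := by
  unfold Pre_find_question_word_index; infer_instance

def pvWitness_find_question_word_index : (List (String × String)) := [("text", "?? ab ?")]

def Spec_find_question_word_index (s : List (String × String)) (out : List (Int × Int)) : Prop := out = find_question_word_index_alt s
instance (s : List (String × String)) (out : List (Int × Int)) : Decidable (Spec_find_question_word_index s out) := by unfold Spec_find_question_word_index; infer_instance

-- ===== CLAIM (what is proved, stated in full; the proofs are below) =====
def Claim_equal_find_question_word_index : Prop := ∀ (s : List (String × String)), Dom_find_question_word_index s → Pre_find_question_word_index s → Spec_find_question_word_index s (find_question_word_index s)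

-- ===== LEMMAS AND PROOFS =====

-- core loop equivalence: A's fold equals acc ++ (B's recursion shifted by the running index)
theorem fqwi_loop_eq (ws : List String) (i0 : Int) (acc : List (Int × Int)) (c0 : Int) :
    ((PySem.List.enumerate ws i0).foldl
      (fun (st : List (Int × Int) × Int) iw =>
        ((if iw.2.toList.all (fun c => c == '?')
          then st.1 ++ [(st.2, PySem.Str.len iw.2)]
          else st.1),
         st.2 + PySem.Str.len iw.2 + 1))
      (acc, c0)).1
    = acc ++ (fqwiGo ws).map (fun p => (p.1 + c0, p.2)) := by
  induction ws generalizing i0 acc c0 with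
  | nil => simp [PySem.List.enumerate_nil, fqwiGo]
  | cons w ws ih =>
    rw [PySem.List.enumerate_cons]
    simp only [List.foldl_cons]
    rw [ih]
    by_cases h : (w.toList.all (fun c => c == '?')) = true
    · simp [fqwiGo, h, List.map_map, Function.comp]
      intro a b _; ring
    · simp [fqwiGo, h, List.map_map, Function.comp]
      intro a b _; ring

-- ===== VERDICT (by name: the statement is the Claim_ definition above) =====
theorem find_question_word_index_spec : Claim_equal_find_question_word_index := by
  intro s _ _
  unfold Spec_find_question_word_index find_question_word_index find_question_word_index_alt
  cases h : (PySem.Dict.mk s).get? "text" with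
  | none => rfl
  | some t =>
    have := fqwi_loop_eq (PySem.Str.split₀ t) 0 [] 0
    simpa using this
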